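-- pv_equiv track=rewrite | github.com/paulelso/aoc2023 | d3/d3-p1.py | calculate_card_pts
-- ===== SOURCE A (Python) =====
-- def calculate_card_pts(winning_nums, my_nums):
--     count = 0
--     pts = 0
--     for num in winning_nums:
--         if num.isdigit() and num in my_nums:
--             count += 1
--             if count == 1:
--                 pts += 1
--             if count > 1:
--                 pts = pts * 2
--     return pts
-- ===== SOURCE B (Python) =====
-- def calculate_card_pts(winning_nums, my_nums):
--     count = sum(1 for num in winning_nums if num.isdigit() and num in my_nums)
--     return 0 if count == 0 else 2 ** (count - 1)
-- ===== Notes on version B (the rewrite author's own statement) =====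
-- stated objective: simpler
-- what changed: Replaces the incremental doubling state machine (count==1 / count>1 branches rebuilding pts per match) with a single count of matches and the closed form 2**(count-1).
import Mathlib
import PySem

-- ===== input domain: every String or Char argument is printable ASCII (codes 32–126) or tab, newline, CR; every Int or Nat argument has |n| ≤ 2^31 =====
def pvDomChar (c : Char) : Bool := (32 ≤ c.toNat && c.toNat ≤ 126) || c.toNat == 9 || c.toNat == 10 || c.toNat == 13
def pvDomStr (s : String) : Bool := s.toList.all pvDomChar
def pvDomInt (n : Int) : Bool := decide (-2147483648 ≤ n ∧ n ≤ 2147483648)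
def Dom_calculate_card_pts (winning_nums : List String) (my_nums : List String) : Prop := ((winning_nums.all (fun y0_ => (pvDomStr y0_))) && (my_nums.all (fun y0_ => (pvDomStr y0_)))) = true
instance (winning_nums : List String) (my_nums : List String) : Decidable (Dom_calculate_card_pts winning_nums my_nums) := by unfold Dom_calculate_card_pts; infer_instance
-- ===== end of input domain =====

-- ===== PORT A =====
-- B replaces A's incremental doubling state machine with a match count and the closed form 2^(count-1) (simpler).
def calculate_card_pts (winning_nums : List String) (my_nums : List String) : Int :=
  (winning_nums.foldl
    (fun (s : Int × Int) num =>
      if PySem.Str.strIsdigit num && my_nums.contains num then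
        let count := s.1 + 1
        let pts := if count == 1 then s.2 + 1 else s.2
        let pts := if count > 1 then pts * 2 else pts
        (count, pts)
      else s)
    (0, 0)).2

-- ===== PORT B =====
def calculate_card_pts_alt (winning_nums : List String) (my_nums : List String) : Int :=
  let count := (winning_nums.filter (fun num => PySem.Str.strIsdigit num && my_nums.contains num)).length
  if count = 0 then 0 else (2 : Int) ^ (count - 1)

-- ===== PRECONDITION & SPEC =====
def Spec_calculate_card_pts (winning_nums : List String) (my_nums : List String) (out : Int) : Prop := out = calculate_card_pts_alt winning_nums my_nums
instance (winning_nums : List String) (my_nums : List String) (out : Int) : Decidable (Spec_calculate_card_pts winning_nums my_nums out) := by unfold Spec_calculate_card_pts; infer_instance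

-- ===== CLAIM (what is proved, stated in full; the proofs are below) =====
def Claim_equal_calculate_card_pts : Prop := ∀ (winning_nums : List String) (my_nums : List String), Dom_calculate_card_pts winning_nums my_nums → Spec_calculate_card_pts winning_nums my_nums (calculate_card_pts winning_nums my_nums)

-- ===== LEMMAS AND PROOFS =====

-- ===== VERDICT (by name: the statement is the Claim_ definition above) =====
-- closed form value for a given match count
def pvPts (c : Nat) : Int := if c = 0 then 0 else (2 : Int) ^ (c - 1)

theorem pvPts_fold (my_nums : List String) (l : List String) (c : Nat) :
    (l.foldl
      (fun (s : Int × Int) num =>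
        if PySem.Str.strIsdigit num && my_nums.contains num then
          let count := s.1 + 1
          let pts := if count == 1 then s.2 + 1 else s.2
          let pts := if count > 1 then pts * 2 else pts
          (count, pts)
        else s)
      ((c : Int), pvPts c)).2
    = pvPts (c + (l.filter (fun num => PySem.Str.strIsdigit num && my_nums.contains num)).length) := by
  induction l generalizing c with
  | nil => simp
  | cons x xs ih =>
    simp only [List.foldl_cons, List.filter_cons]
    by_cases h : (PySem.Str.strIsdigit x && my_nums.contains x) = true
    · rw [if_pos h, if_pos h]
      have step : ((c : Int) + 1,
          if (c : Int) + 1 > 1 then (if (((c : Int) + 1 == 1)) then pvPts c + 1 else pvPts c) * 2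
          else if (((c : Int) + 1 == 1)) then pvPts c + 1 else pvPts c)
          = (((c + 1 : Nat) : Int), pvPts (c + 1)) := by
        rcases Nat.eq_zero_or_pos c with hc | hc
        · subst hc; simp [pvPts]
        · have h1 : (((c : Int) + 1) == 1) = false := by
            simp only [beq_eq_false_iff_ne, ne_eq]; omega
          have h2 : ((c : Int) + 1) > 1 := by omega
          have hc0 : ¬ c = 0 := by omega
          have hc1 : ¬ c + 1 = 0 := by omega
          simp only [h1, if_pos h2, Bool.false_eq_true, if_false, pvPts, hc0, hc1,
            if_false]
          refine Prod.ext (by push_cast; ring) ?_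
          show (2 : Int) ^ (c - 1) * 2 = 2 ^ (c + 1 - 1)
          rw [show c + 1 - 1 = c from rfl, ← pow_succ, (by omega : c - 1 + 1 = c)]
      rw [step, ih (c + 1)]
      have : c + 1 + (List.filter (fun num => PySem.Str.strIsdigit num && my_nums.contains num) xs).length
           = c + (x :: List.filter (fun num => PySem.Str.strIsdigit num && my_nums.contains num) xs).length := by
        simp; omega
      rw [this]
    · rw [if_neg h, if_neg h, ih c]

-- ===== VERDICT (by name: the statement is the Claim_ definition above) =====
theorem calculate_card_pts_spec : Claim_equal_calculate_card_pts := by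
  intro w m _
  show calculate_card_pts w m = calculate_card_pts_alt w m
  unfold calculate_card_pts calculate_card_pts_alt
  have := pvPts_fold m w 0
  simpa [pvPts] using this
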